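-- pv_equiv track=rewrite | github.com/ashudnsingh/CodeSignal | Graphs/Contours of Everything/015 - isTadpole.py | isTadpole
-- ===== SOURCE A (Python) =====
-- def isTadpole(adj):
--     edgeCount = [sum(row) for row in adj]
--     if 1 not in edgeCount or 3 not in edgeCount or len([x for x in edgeCount if x == 2]) != adj.__len__()-2:
--         return False
--     visited = [False] * adj.__len__()
--
--     nodes = [0]
--     while nodes.__len__():
--         curNode = nodes.pop()
--         visited[curNode] = True
--         for x in range(len(adj)):
--             if adj[curNode][x] and not visited[x]:
--                 nodes.append(x)
--     return edgeCount and all(visited)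
-- ===== SOURCE B (Python) =====
-- def isTadpole(adj):
--     n = len(adj)
--     deg = [sum(row) for row in adj]
--     if 1 not in deg or 3 not in deg or deg.count(2) != n - 2:
--         return False
--     # reachability from vertex 0 by a bounded fixpoint closure:
--     # n full sweeps of the matrix are enough to saturate the reachable set
--     reach = {0}
--     for _ in range(n):
--         for r in range(n):
--             if r in reach:
--                 for x, v in enumerate(adj[r]):
--                     if v and x not in reach:
--                         reach.add(x)
--     return len(reach) == n
-- ===== Notes on version B (the rewrite author's own statement) =====
-- stated objective: alternative
-- what changed: keeps the degree-sequence test but replaces the explicit-stack DFS with a bounded fixpoint closure: n full matrix sweeps that grow the set reachable from vertex 0 until saturation, then compares the set's size with n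
-- outside the precondition, e.g. on isTadpole([[0, 1, 0], [1, 0, 1], [1, 1, 0, 1]]): A returns True, B returns False
import Mathlib
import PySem

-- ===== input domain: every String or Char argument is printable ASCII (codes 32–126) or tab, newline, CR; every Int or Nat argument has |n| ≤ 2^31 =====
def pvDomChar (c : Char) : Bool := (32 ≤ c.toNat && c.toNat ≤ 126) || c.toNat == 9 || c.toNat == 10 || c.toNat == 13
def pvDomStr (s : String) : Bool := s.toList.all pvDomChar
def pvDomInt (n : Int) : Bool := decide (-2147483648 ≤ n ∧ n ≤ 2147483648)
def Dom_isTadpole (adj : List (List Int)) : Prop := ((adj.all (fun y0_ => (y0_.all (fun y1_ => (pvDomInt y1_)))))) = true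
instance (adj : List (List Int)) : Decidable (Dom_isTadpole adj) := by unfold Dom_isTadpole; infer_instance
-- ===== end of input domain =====

-- B replaces A's explicit-stack DFS by a bounded fixpoint closure (n full matrix
-- sweeps growing the reachable set, then a size comparison); same cost class, no speed claim.


-- ===== PORT A =====
-- sum(row)
def pvSum (row : List Int) : Int := row.foldl (· + ·) 0

-- the nodes appended by the inner 'for x in range(len(adj))' loop, in pop (= reversed) order
def pvPushes (adj : List (List Int)) (visited : List Bool) (row : List Int) : List Int :=
  ((PySem.List.pyRange 0 adj.length 1).filter
    (fun x => decide (row.getD x.toNat 0 ≠ 0) && !(visited.getD x.toNat false))).reverse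

-- termination helpers for the while loop (cited by decreasing_by)
theorem pv_count_set_lt (l : List Bool) (i : Nat) (h : i < l.length)
    (hf : l.getD i false = false) : (l.set i true).count false < l.count false := by
  induction l generalizing i with
  | nil => simp at h
  | cons b t ih =>
    cases i with
    | zero =>
      simp only [List.getD_cons_zero] at hf
      subst hf
      simp [List.count_cons]
    | succ j =>
      simp only [List.getD_cons_succ] at hf
      simp only [List.length_cons, Nat.succ_lt_succ_iff] at h
      simp only [List.set_cons_succ, List.count_cons]
      have := ih j h hf
      omega

theorem pv_set_getD_true (l : List Bool) (i : Nat) (ht : l.getD i false = true) :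
    l.set i true = l := by
  induction l generalizing i with
  | nil => rfl
  | cons b t ih =>
    cases i with
    | zero => simp only [List.getD_cons_zero] at ht; simp [ht]
    | succ j => simp only [List.getD_cons_succ] at ht; simp [ih j ht]

theorem pv_mem_pushes (adj : List (List Int)) (visited : List Bool) (row : List Int) (e : Int) :
    e ∈ pvPushes adj visited row ↔
      (0 ≤ e ∧ e < (adj.length : Int) ∧ row.getD e.toNat 0 ≠ 0 ∧ visited.getD e.toNat false = false) := by
  unfold pvPushes
  rw [List.mem_reverse, List.mem_filter, PySem.List.mem_pyRange_one,
    Bool.and_eq_true, decide_eq_true_eq, Bool.not_eq_true']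
  tauto

theorem pv_filter_pushes_nil (adj : List (List Int)) (visited : List Bool) (row : List Int) :
    (pvPushes adj visited row).filter (fun e => visited.getD e.toNat false) = [] := by
  rw [List.filter_eq_nil_iff]
  intro e he
  rw [pv_mem_pushes] at he
  simpa using he.2.2.2

-- while nodes: cur = nodes.pop(); visited[cur] = True; push unvisited neighbours.
-- Stack is kept top-first; 'none' = the IndexError cases (cur or a needed column out of range).
def pvDfs (adj : List (List Int)) (visited : List Bool) (nodes : List Int) : Option (List Bool) :=
  match nodes with
  | [] => some visited
  | cur :: rest =>
    if h : 0 ≤ cur ∧ cur.toNat < visited.length ∧ cur.toNat < adj.length ∧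
           adj.length ≤ (adj.getD cur.toNat []).length then
      pvDfs adj (visited.set cur.toNat true)
        (pvPushes adj (visited.set cur.toNat true) (adj.getD cur.toNat []) ++ rest)
    else none
termination_by (visited.count false, (nodes.filter (fun e => visited.getD e.toNat false)).length)
decreasing_by
  by_cases hv : visited.getD cur.toNat false = true
  · rw [pv_set_getD_true _ _ hv]
    apply Prod.Lex.right
    rw [List.filter_append, pv_filter_pushes_nil, List.nil_append]
    have hv2 : visited[cur.toNat]?.getD false = true := by
      rw [← List.getD_eq_getElem?_getD]; exact hv
    have : (List.filter (fun e => visited.getD e.toNat false) (cur :: rest)) =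
        cur :: List.filter (fun e => visited.getD e.toNat false) rest := by
      simp [List.getD_eq_getElem?_getD, hv2]
    rw [this]
    simp
  · apply Prod.Lex.left
    exact pv_count_set_lt _ _ h.2.1 (by simpa using hv)

def isTadpole (adj : List (List Int)) : Bool :=
  if 1 ∉ adj.map pvSum ∨ 3 ∉ adj.map pvSum ∨
      (((adj.map pvSum).filter (fun x => decide (x = 2))).length : Int) ≠ (adj.length : Int) - 2 then
    false
  else
    match pvDfs adj (List.replicate adj.length false) [0] with
    | some vis => decide (adj.map pvSum ≠ []) && vis.all (fun b => b)
    | none => false   -- unreachable under Pre_ (Python raises IndexError there)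

-- ===== PORT B =====
-- one full sweep of the matrix: for r in range(n): if r in reach: for x, v in enumerate(adj[r]): …
def pvRowStep (acc2 : PySem.Set Int) (p : Int × Int) : PySem.Set Int :=
  if p.2 ≠ 0 ∧ p.1 ∉ acc2 then PySem.Set.add acc2 p.1 else acc2

def pvRowFold (acc : PySem.Set Int) (row : List Int) : PySem.Set Int :=
  (PySem.List.enumerate row).foldl pvRowStep acc

def pvSweep (adj : List (List Int)) (reach : PySem.Set Int) : PySem.Set Int :=
  (List.range adj.length).foldl
    (fun (acc : PySem.Set Int) (r : Nat) =>
      if (r : Int) ∈ acc then pvRowFold acc (adj.getD r []) else acc) reach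

def isTadpole_alt (adj : List (List Int)) : Bool :=
  if 1 ∉ adj.map pvSum ∨ 3 ∉ adj.map pvSum ∨
      (((adj.map pvSum).count 2 : Nat) : Int) ≠ (adj.length : Int) - 2 then false
  else
    decide (((((List.range adj.length).foldl (fun acc _ => pvSweep adj acc)
      (PySem.Set.ofList [(0 : Int)])).length : Nat) : Int) = (adj.length : Int))

-- ===== PRECONDITION & SPEC =====
-- Pre_ excludes non-square matrices that pass the degree test: there A either raises
-- IndexError in the DFS (a reachable row shorter than n) or silently ignores the columns
-- beyond n of an over-long row, which B's row-wise sweep does not reproduce.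
def Pre_isTadpole (adj : List (List Int)) : Prop :=
  (∀ row ∈ adj, row.length = adj.length) ∨
  ¬((1 : Int) ∈ adj.map (fun row => row.foldl (· + ·) 0) ∧
    (3 : Int) ∈ adj.map (fun row => row.foldl (· + ·) 0) ∧
    ((((adj.map (fun row => row.foldl (· + ·) 0)).filter (fun x => decide (x = 2))).length : Int)
      = (adj.length : Int) - 2))
instance (adj : List (List Int)) : Decidable (Pre_isTadpole adj) := by
  unfold Pre_isTadpole; infer_instance

def pvWitness_isTadpole : List (List Int) :=
  [[0, 1, 1, 1], [1, 0, 1, 0], [1, 1, 0, 0], [1, 0, 0, 0]]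

def Spec_isTadpole (adj : List (List Int)) (out : Bool) : Prop := out = isTadpole_alt adj
instance (adj : List (List Int)) (out : Bool) : Decidable (Spec_isTadpole adj out) := by
  unfold Spec_isTadpole; infer_instance

-- ===== CLAIM (what is proved, stated in full; the proofs are below) =====
def Claim_equal_isTadpole : Prop := ∀ (adj : List (List Int)),
  Dom_isTadpole adj → Pre_isTadpole adj → Spec_isTadpole adj (isTadpole adj)

-- ===== LEMMAS AND PROOFS =====

-- ghost graph: directed edge u → v read from the matrix, and reachability from vertex 0
def pvEdge (adj : List (List Int)) (u v : Nat) : Prop :=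
  u < adj.length ∧ v < adj.length ∧ (adj.getD u []).getD v 0 ≠ 0

def pvReach (adj : List (List Int)) (v : Nat) : Prop :=
  Relation.ReflTransGen (pvEdge adj) 0 v

-- soundness predicate: an element of the working set is a reachable in-range vertex
def pvSound (adj : List (List Int)) (e : Int) : Prop :=
  ∃ u : Nat, e = (u : Int) ∧ u < adj.length ∧ pvReach adj u

-- ---------- small getD/set facts ----------
theorem pv_getD_replicate (n u : Nat) : (List.replicate n false).getD u false = false := by
  simp only [List.getD_eq_getElem?_getD, List.getElem?_replicate]
  split <;> rfl

theorem pv_getD_set_self (l : List Bool) (i : Nat) (h : i < l.length) :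
    (l.set i true).getD i false = true := by
  induction l generalizing i with
  | nil => simp at h
  | cons b t ih =>
    cases i with
    | zero => rfl
    | succ j =>
      simp only [List.length_cons, Nat.succ_lt_succ_iff] at h
      simpa using ih j h

theorem pv_getD_set_ne (l : List Bool) (i u : Nat) (h : i ≠ u) :
    (l.set i true).getD u false = l.getD u false := by
  induction l generalizing i u with
  | nil => rfl
  | cons b t ih =>
    cases i with
    | zero => cases u with
      | zero => exact absurd rfl h
      | succ v => rfl
    | succ j => cases u with
      | zero => rfl
      | succ v => simpa using ih j v (by omega)

theorem pv_getD_set_mono (l : List Bool) (i u : Nat) (h : l.getD u false = true) :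
    (l.set i true).getD u false = true := by
  by_cases hiu : i = u
  · subst hiu
    have hil : i < l.length := by
      by_contra hc
      rw [List.getD_eq_getElem?_getD, List.getElem?_eq_none (by omega)] at h
      exact absurd h (by simp)
    exact pv_getD_set_self l i hil
  · rw [pv_getD_set_ne l i u hiu]; exact h

theorem pv_getD_set_inv (l : List Bool) (i u : Nat)
    (h : (l.set i true).getD u false = true) : u = i ∨ l.getD u false = true := by
  by_cases hiu : i = u
  · exact Or.inl hiu.symm
  · rw [pv_getD_set_ne l i u hiu] at h; exact Or.inr h

-- ---------- the DFS loop: invariants in, characterisation of the final array out ----------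
theorem pv_dfs_correct (adj : List (List Int))
    (hsq : ∀ row ∈ adj, row.length = adj.length) :
    ∀ (visited : List Bool) (nodes : List Int),
    visited.length = adj.length →
    (∀ e ∈ nodes, pvSound adj e) →
    (∀ u : Nat, u < adj.length → visited.getD u false = true → pvReach adj u) →
    (∀ u v : Nat, pvEdge adj u v → visited.getD u false = true →
        visited.getD v false = true ∨ (v : Int) ∈ nodes) →
    ((0 : Int) ∈ nodes ∨ visited.getD 0 false = true) →
    ∃ vis, pvDfs adj visited nodes = some vis ∧ vis.length = adj.length ∧
      (∀ u : Nat, u < adj.length → (vis.getD u false = true ↔ pvReach adj u)) := by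
  intro visited nodes
  induction visited, nodes using pvDfs.induct adj with
  | case1 visited =>
    intro hlen _ hI2 hI3 hI4
    refine ⟨visited, by rw [pvDfs], hlen, ?_⟩
    intro u hu
    constructor
    · exact hI2 u hu
    · intro hr
      have key : ∀ w : Nat, pvReach adj w → visited.getD w false = true := by
        intro w hw
        induction hw with
        | refl => exact hI4.resolve_left (by simp)
        | tail hst hed ih =>
          rcases hI3 _ _ hed ih with h | h
          · exact h
          · simp at h
      exact key u hr
  | case2 visited cur rest h ih =>
    intro hlen hI1 hI2 hI3 hI4
    obtain ⟨hc0, hcv, hca, hcrow⟩ := h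
    -- cur is a genuine vertex
    obtain ⟨cu, hcu_eq, hcu_lt, hcu_reach⟩ := hI1 cur (by simp)
    have hcu : cur.toNat = cu := by rw [hcu_eq, Int.toNat_natCast]
    set row := adj.getD cur.toNat [] with hrow_def
    set visited' := visited.set cur.toNat true with hvis'_def
    have hlen' : visited'.length = adj.length := by
      rw [hvis'_def, List.length_set]; exact hlen
    have hmono : ∀ w : Nat, visited.getD w false = true → visited'.getD w false = true :=
      fun w hw => pv_getD_set_mono visited cur.toNat w hw
    have hrowlen : row.length = adj.length := by
      apply hsq
      rw [hrow_def, List.getD_eq_getElem?_getD, List.getElem?_eq_getElem hca]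
      exact List.getElem_mem hca
    -- invariants for the recursive state
    have hI1' : ∀ e ∈ pvPushes adj visited' row ++ rest, pvSound adj e := by
      intro e he
      rcases List.mem_append.mp he with hp | hr
      · rw [pv_mem_pushes] at hp
        obtain ⟨he0, helt, henz, -⟩ := hp
        have hedge : pvEdge adj cur.toNat e.toNat := by
          refine ⟨hca, ?_, henz⟩
          omega
        refine ⟨e.toNat, (Int.toNat_of_nonneg he0).symm, by omega, ?_⟩
        rw [hcu] at hedge
        exact hcu_reach.tail hedge
      · exact hI1 e (by simp [hr])
    have hI2' : ∀ u : Nat, u < adj.length → visited'.getD u false = true → pvReach adj u := by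
      intro u hu hvu
      rcases pv_getD_set_inv visited cur.toNat u hvu with rfl | hold
      · rw [hcu]; exact hcu_reach
      · exact hI2 u hu hold
    have hI3' : ∀ u v : Nat, pvEdge adj u v → visited'.getD u false = true →
        visited'.getD v false = true ∨ (v : Int) ∈ pvPushes adj visited' row ++ rest := by
      intro u v hedge hvu
      rcases pv_getD_set_inv visited cur.toNat u hvu with rfl | hold
      · -- u = cur.toNat : v was just pushed unless already visited
        by_cases hvv : visited'.getD v false = true
        · exact Or.inl hvv
        · refine Or.inr (List.mem_append.mpr (Or.inl ?_))
          rw [pv_mem_pushes]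
          refine ⟨Int.natCast_nonneg v, ?_, ?_, ?_⟩
          · exact_mod_cast hedge.2.1
          · rw [Int.toNat_natCast]; exact hedge.2.2
          · rw [Int.toNat_natCast]; exact Bool.not_eq_true _ ▸ (by simpa using hvv)
      · rcases hI3 u v hedge hold with hv | hv
        · exact Or.inl (hmono v hv)
        · rcases List.mem_cons.mp hv with hveq | hvr
          · left
            have : cur.toNat = v := by rw [← hveq, Int.toNat_natCast]
            rw [← this]
            exact pv_getD_set_self visited cur.toNat hcv
          · exact Or.inr (List.mem_append.mpr (Or.inr hvr))
    have hI4' : (0 : Int) ∈ pvPushes adj visited' row ++ rest ∨ visited'.getD 0 false = true := by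
      rcases hI4 with hmem | htrue
      · rcases List.mem_cons.mp hmem with h0 | h0
        · right
          have : cur.toNat = 0 := by rw [← h0]; rfl
          rw [← this]
          exact pv_getD_set_self visited cur.toNat hcv
        · exact Or.inl (List.mem_append.mpr (Or.inr h0))
      · exact Or.inr (hmono 0 htrue)
    obtain ⟨vis, heq, hl, hch⟩ := ih hlen' hI1' hI2' hI3' hI4'
    refine ⟨vis, ?_, hl, hch⟩
    rw [pvDfs, dif_pos ⟨hc0, hcv, hca, hcrow⟩]
    exact heq
  | case3 visited cur rest h =>
    intro hlen hI1 _ _ _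
    exfalso
    obtain ⟨cu, hcu_eq, hcu_lt, -⟩ := hI1 cur (by simp)
    have hc0 : (0:Int) ≤ cur := by rw [hcu_eq]; exact Int.natCast_nonneg cu
    have hct : cur.toNat = cu := by rw [hcu_eq, Int.toNat_natCast]
    have hca : cur.toNat < adj.length := by omega
    have hrowlen : (adj.getD cur.toNat []).length = adj.length := by
      apply hsq
      rw [List.getD_eq_getElem?_getD, List.getElem?_eq_getElem hca]
      exact List.getElem_mem hca
    exact h ⟨hc0, by omega, hca, by omega⟩

-- ---------- B-side generic fold facts ----------
theorem pv_foldl_prefix {β : Type} (step : List Int → β → List Int)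
    (hstep : ∀ acc b, List.IsPrefix acc (step acc b)) :
    ∀ (l : List β) (acc : List Int), List.IsPrefix acc (l.foldl step acc) := by
  intro l
  induction l with
  | nil => intro acc; exact List.prefix_refl _
  | cons b t ih => intro acc; exact (hstep acc b).trans (ih _)

theorem pv_rowstep_prefix (acc : PySem.Set Int) (p : Int × Int) :
    List.IsPrefix acc (pvRowStep acc p) := by
  unfold pvRowStep
  split
  · rw [PySem.Set.add_eq_ite]
    split
    · exact List.prefix_refl _
    · exact List.prefix_append _ _
  · exact List.prefix_refl _

theorem pv_rowfold_prefix (acc : PySem.Set Int) (row : List Int) :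
    List.IsPrefix acc (pvRowFold acc row) :=
  pv_foldl_prefix pvRowStep pv_rowstep_prefix (PySem.List.enumerate row) acc

theorem pv_sweep_prefix (adj : List (List Int)) (S : PySem.Set Int) :
    List.IsPrefix S (pvSweep adj S) := by
  apply pv_foldl_prefix
  intro acc r
  by_cases hr : (r : Int) ∈ acc
  · simpa [hr] using pv_rowfold_prefix acc (adj.getD r [])
  · simp [hr]

theorem pv_iterate_prefix (adj : List (List Int)) (S : PySem.Set Int) (k : Nat) :
    List.IsPrefix S ((pvSweep adj)^[k] S) := by
  induction k with
  | zero => exact List.prefix_refl _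
  | succ j ih =>
    rw [Function.iterate_succ_apply']
    exact ih.trans (pv_sweep_prefix adj _)

theorem pv_rowstep_nodup (acc : PySem.Set Int) (p : Int × Int) (h : acc.Nodup) :
    (pvRowStep acc p).Nodup := by
  unfold pvRowStep
  split
  · exact PySem.Set.nodup_add _ _ h
  · exact h

theorem pv_foldl_pres {β : Type} (step : List Int → β → List Int) (P : List Int → Prop)
    (hstep : ∀ acc b, P acc → P (step acc b)) :
    ∀ (l : List β) (acc : List Int), P acc → P (l.foldl step acc) := by
  intro l
  induction l with
  | nil => intro acc h; exact h
  | cons b t ih => intro acc h; exact ih _ (hstep acc b h)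

theorem pv_sweep_nodup (adj : List (List Int)) (S : PySem.Set Int) (h : S.Nodup) :
    (pvSweep adj S).Nodup := by
  refine pv_foldl_pres _ List.Nodup ?_ _ _ h
  intro acc r hacc
  by_cases hr : (r : Int) ∈ acc
  · simp only [if_pos hr]
    exact pv_foldl_pres _ List.Nodup (fun a p hp => pv_rowstep_nodup a p hp) _ _ hacc
  · simpa [hr] using hacc

-- ---------- B-side soundness ----------
theorem pv_rowfold_sound (adj : List (List Int)) (r : Nat)
    (hr : pvReach adj r) (hrn : r < adj.length) :
    ∀ (l : List (Int × Int)),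
    (∀ p ∈ l, ∃ k : Nat, k < adj.length ∧ p = ((k : Int), (adj.getD r []).getD k 0)) →
    ∀ acc, (∀ e ∈ acc, pvSound adj e) → ∀ e ∈ l.foldl pvRowStep acc, pvSound adj e := by
  intro l
  induction l with
  | nil => intro _ acc hacc e he; exact hacc e he
  | cons p t ih =>
    intro hl acc hacc
    apply ih (fun q hq => hl q (List.mem_cons_of_mem p hq))
    intro e he
    unfold pvRowStep at he
    split at he
    · rcases (PySem.Set.mem_add acc p.1 e).mp he with hin | hnew
      · exact hacc e hin
      · obtain ⟨k, hk, hpk⟩ := hl p (List.mem_cons_self ..)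
        have hp1 : p.1 = (k : Int) := by rw [hpk]
        have hp2 : p.2 = (adj.getD r []).getD k 0 := by rw [hpk]
        rename_i hcond
        have hedge : pvEdge adj r k := ⟨hrn, hk, by rw [← hp2]; exact hcond.1⟩
        exact ⟨k, by rw [hnew, hp1], hk, hr.tail hedge⟩
    · exact hacc e he

theorem pv_sweep_sound (adj : List (List Int))
    (hsq : ∀ row ∈ adj, row.length = adj.length) (S : PySem.Set Int)
    (hS : ∀ e ∈ S, pvSound adj e) :
    ∀ e ∈ pvSweep adj S, pvSound adj e := by
  have main : ∀ (l : List Nat), (∀ r ∈ l, r < adj.length) →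
      ∀ acc, (∀ e ∈ acc, pvSound adj e) →
      ∀ e ∈ l.foldl (fun (acc : PySem.Set Int) (r : Nat) =>
          if (r : Int) ∈ acc then pvRowFold acc (adj.getD r []) else acc) acc,
        pvSound adj e := by
    intro l
    induction l with
    | nil => intro _ acc hacc e he; exact hacc e he
    | cons r t ih =>
      intro hl acc hacc
      apply ih (fun q hq => hl q (List.mem_cons_of_mem r hq))
      by_cases hrin : (r : Int) ∈ acc
      · simp only [if_pos hrin]
        have hrn : r < adj.length := hl r (List.mem_cons_self ..)
        have hreach : pvReach adj r := by
          obtain ⟨u, hu_eq, -, hu_reach⟩ := hacc _ hrin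
          have : u = r := by exact_mod_cast hu_eq.symm
          rw [← this]; exact hu_reach
        have hlen : (adj.getD r []).length = adj.length := by
          apply hsq
          rw [List.getD_eq_getElem?_getD, List.getElem?_eq_getElem hrn]
          exact List.getElem_mem hrn
        apply pv_rowfold_sound adj r hreach hrn
        · intro p hp
          obtain ⟨k, hkl, hpk⟩ := (PySem.List.mem_enumerate_iff _ _ _).mp hp
          refine ⟨k, by omega, ?_⟩
          rw [hpk, List.getD_eq_getElem _ _ hkl]
          simp
        · exact hacc
      · simpa [hrin] using hacc
  intro e he
  refine main (List.range adj.length) (fun r hr => List.mem_range.mp hr) S hS e he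

-- ---------- B-side completeness ----------
theorem pv_mem_rowfold_self :
    ∀ (l : List (Int × Int)) (acc : PySem.Set Int) (p : Int × Int),
      p ∈ l → p.2 ≠ 0 → p.1 ∈ l.foldl pvRowStep acc := by
  intro l
  induction l with
  | nil => intro acc p hp; simp at hp
  | cons q t ih =>
    intro acc p hp hnz
    rcases List.mem_cons.mp hp with rfl | hpt
    · have hmem : p.1 ∈ pvRowStep acc p := by
        unfold pvRowStep
        split
        · exact (PySem.Set.mem_add acc p.1 p.1).mpr (Or.inr rfl)
        · rename_i hcond
          rw [not_and_or] at hcond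
          rcases hcond with hc | hc
          · exact absurd hnz hc
          · simpa using hc
      exact (pv_foldl_prefix pvRowStep pv_rowstep_prefix t (pvRowStep acc p)).subset hmem
    · exact ih _ p hpt hnz

theorem pv_sweepstep_prefix (adj : List (List Int)) (acc : PySem.Set Int) (r : Nat) :
    List.IsPrefix acc (if (r : Int) ∈ acc then pvRowFold acc (adj.getD r []) else acc) := by
  by_cases hr : (r : Int) ∈ acc
  · simpa [hr] using pv_rowfold_prefix acc (adj.getD r [])
  · simp [hr]

theorem pv_mem_sweep_of_edge (adj : List (List Int)) (S : PySem.Set Int) (r x : Nat)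
    (hr : (r : Int) ∈ S) (hrn : r < adj.length)
    (hx : x < (adj.getD r []).length) (hnz : (adj.getD r []).getD x 0 ≠ 0) :
    (x : Int) ∈ pvSweep adj S := by
  obtain ⟨l₁, l₂, hsplit⟩ := List.mem_iff_append.mp (List.mem_range.mpr hrn)
  unfold pvSweep
  rw [hsplit, List.foldl_append, List.foldl_cons]
  set step := fun (acc : PySem.Set Int) (r : Nat) =>
    if (r : Int) ∈ acc then pvRowFold acc (adj.getD r []) else acc with hstep
  have hpre1 : List.IsPrefix S (l₁.foldl step S) :=
    pv_foldl_prefix step (fun acc b => pv_sweepstep_prefix adj acc b) l₁ S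
  have hrin : (r : Int) ∈ l₁.foldl step S := hpre1.subset hr
  rw [if_pos hrin]
  have hp : ((0 : Int) + (x : Int), (adj.getD r [])[x]) ∈ PySem.List.enumerate (adj.getD r []) := by
    exact (PySem.List.mem_enumerate_iff _ _ _).mpr ⟨x, hx, rfl⟩
  have hpz : (adj.getD r [])[x] ≠ 0 := by
    rwa [List.getD_eq_getElem _ _ hx] at hnz
  have hmem := pv_mem_rowfold_self (PySem.List.enumerate (adj.getD r []))
      (l₁.foldl step S) (((0 : Int) + (x : Int), (adj.getD r [])[x])) hp hpz
  have hmem' : (x : Int) ∈ pvRowFold (l₁.foldl step S) (adj.getD r []) := by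
    simpa [pvRowFold] using hmem
  exact (pv_foldl_prefix step (fun acc b => pv_sweepstep_prefix adj acc b) l₂ _).subset hmem'

-- ---------- iterating the sweep ----------
theorem pv_foldl_const (f : PySem.Set Int → PySem.Set Int) :
    ∀ (k : Nat) (s : PySem.Set Int), (List.range k).foldl (fun a _ => f a) s = f^[k] s := by
  intro k
  induction k with
  | zero => intro s; rfl
  | succ j ih =>
    intro s
    rw [List.range_succ, List.foldl_append, ih, List.foldl_cons, List.foldl_nil,
      Function.iterate_succ_apply']

theorem pv_iter_sound (adj : List (List Int))
    (hsq : ∀ row ∈ adj, row.length = adj.length) (h0 : 0 < adj.length) (k : Nat) :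
    ∀ e ∈ (pvSweep adj)^[k] (PySem.Set.ofList [(0 : Int)]), pvSound adj e := by
  induction k with
  | zero =>
    intro e he
    have : e = 0 := by simpa [PySem.Set.ofList] using he
    exact ⟨0, by simp [this], h0, Relation.ReflTransGen.refl⟩
  | succ j ih =>
    rw [Function.iterate_succ_apply']
    exact pv_sweep_sound adj hsq _ ih

theorem pv_iter_nodup (adj : List (List Int)) (k : Nat) :
    ((pvSweep adj)^[k] (PySem.Set.ofList [(0 : Int)])).Nodup := by
  induction k with
  | zero => exact PySem.Set.nodup_ofList _
  | succ j ih =>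
    rw [Function.iterate_succ_apply']
    exact pv_sweep_nodup adj _ ih

theorem pv_sound_subset (adj : List (List Int)) (S : PySem.Set Int)
    (hs : ∀ e ∈ S, pvSound adj e) :
    S ⊆ (List.range adj.length).map (fun u : Nat => (u : Int)) := by
  intro e he
  obtain ⟨u, rfl, hu, -⟩ := hs e he
  exact List.mem_map_of_mem (List.mem_range.mpr hu)

theorem pv_sound_length_le (adj : List (List Int)) (S : PySem.Set Int)
    (hs : ∀ e ∈ S, pvSound adj e) (hn : S.Nodup) : S.length ≤ adj.length := by
  have hle := (List.subperm_of_subset hn (pv_sound_subset adj S hs)).length_le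
  simpa using hle

theorem pv_fix (adj : List (List Int))
    (hsq : ∀ row ∈ adj, row.length = adj.length) (h0 : 0 < adj.length) :
    pvSweep adj ((pvSweep adj)^[adj.length] (PySem.Set.ofList [(0 : Int)]))
      = (pvSweep adj)^[adj.length] (PySem.Set.ofList [(0 : Int)]) := by
  set f := pvSweep adj with hf
  set S0 : PySem.Set Int := PySem.Set.ofList [(0 : Int)] with hS0
  have key : ∀ k : Nat, f (f^[k] S0) = f^[k] S0 ∨ k + 1 ≤ (f^[k] S0).length := by
    intro k
    induction k with
    | zero =>
      right
      simp [hS0, PySem.Set.ofList]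
    | succ j ih =>
      rcases ih with hfix | hlen
      · left
        simp [Function.iterate_succ_apply', hfix]
      · by_cases heq : f (f^[j] S0) = f^[j] S0
        · left
          simp [Function.iterate_succ_apply', heq]
        · right
          rw [Function.iterate_succ_apply']
          have hpre := pv_sweep_prefix adj (f^[j] S0)
          have hlelen : (f^[j] S0).length ≤ (f (f^[j] S0)).length := hpre.length_le
          have hne : (f^[j] S0).length ≠ (f (f^[j] S0)).length := by
            intro hll
            exact heq (hpre.eq_of_length hll).symm
          omega
  rcases key adj.length with hfix | hlen
  · exact hfix
  · exfalso
    have hle := pv_sound_length_le adj (f^[adj.length] S0)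
      (pv_iter_sound adj hsq h0 adj.length) (pv_iter_nodup adj adj.length)
    omega

theorem pv_reach_mem_F (adj : List (List Int))
    (hsq : ∀ row ∈ adj, row.length = adj.length) (h0 : 0 < adj.length)
    (u : Nat) (hr : pvReach adj u) :
    (u : Int) ∈ (pvSweep adj)^[adj.length] (PySem.Set.ofList [(0 : Int)]) := by
  induction hr with
  | refl =>
    exact (pv_iterate_prefix adj _ adj.length).subset (by simp [PySem.Set.ofList])
  | @tail b c hst hedge ih =>
    obtain ⟨hbn, hcn, hnz⟩ := hedge
    have hx : c < (adj.getD b []).length := by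
      have : (adj.getD b []).length = adj.length := by
        apply hsq
        rw [List.getD_eq_getElem?_getD, List.getElem?_eq_getElem hbn]
        exact List.getElem_mem hbn
      omega
    have := pv_mem_sweep_of_edge adj _ b c ih hbn hx hnz
    rwa [pv_fix adj hsq h0] at this

theorem pv_F_len_iff (adj : List (List Int))
    (hsq : ∀ row ∈ adj, row.length = adj.length) (h0 : 0 < adj.length) :
    (((pvSweep adj)^[adj.length] (PySem.Set.ofList [(0 : Int)])).length = adj.length)
      ↔ (∀ u : Nat, u < adj.length → pvReach adj u) := by
  have hsound := pv_iter_sound adj hsq h0 adj.length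
  have hnodup := pv_iter_nodup adj adj.length
  set F := (pvSweep adj)^[adj.length] (PySem.Set.ofList [(0 : Int)]) with hF
  have hLnodup : ((List.range adj.length).map (fun u : Nat => (u : Int))).Nodup :=
    (List.nodup_range).map (fun a b hab => by exact_mod_cast hab)
  constructor
  · intro hlen u hu
    have hsp := List.subperm_of_subset hnodup (pv_sound_subset adj F hsound)
    have hperm := hsp.perm_of_length_le (by simpa using hlen.ge)
    have hmem : (u : Int) ∈ F :=
      hperm.mem_iff.mpr (List.mem_map_of_mem (List.mem_range.mpr hu))
    obtain ⟨u', hu'_eq, -, hu'_reach⟩ := hsound _ hmem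
    have : u = u' := by exact_mod_cast hu'_eq
    rw [this]; exact hu'_reach
  · intro hall
    have hsub2 : ((List.range adj.length).map (fun u : Nat => (u : Int))) ⊆ F := by
      intro e he
      obtain ⟨u, hu, rfl⟩ := List.mem_map.mp he
      exact pv_reach_mem_F adj hsq h0 u (hall u (List.mem_range.mp hu))
    have hle1 := (List.subperm_of_subset hnodup (pv_sound_subset adj F hsound)).length_le
    have hle2 := (List.subperm_of_subset hLnodup hsub2).length_le
    simp only [List.length_map, List.length_range] at hle1 hle2
    omega

-- ---------- bridging the two surface tests ----------
theorem pv_all_iff (vis : List Bool) :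
    (vis.all (fun b => b) = true) ↔ ∀ u : Nat, u < vis.length → vis.getD u false = true := by
  rw [List.all_eq_true]
  constructor
  · intro h u hu
    rw [List.getD_eq_getElem _ _ hu]
    exact h _ (List.getElem_mem hu)
  · intro h b hb
    obtain ⟨i, hi, rfl⟩ := List.mem_iff_getElem.mp hb
    have := h i hi
    rwa [List.getD_eq_getElem _ _ hi] at this

theorem pv_count_eq (l : List Int) :
    l.count 2 = (l.filter (fun x => decide (x = 2))).length := by
  rw [List.count_eq_length_filter]
  have hpq : ∀ x ∈ l, (x == 2) = decide (x = 2) := fun x _ => by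
    by_cases h : x = 2 <;> simp [h]
  rw [List.filter_congr hpq]

-- ===== VERDICT (by name: the statement is the Claim_ definition above) =====
theorem isTadpole_spec : Claim_equal_isTadpole := by
  intro adj _ hpre
  unfold Spec_isTadpole isTadpole isTadpole_alt
  by_cases hC : (1 : Int) ∈ adj.map pvSum ∧ (3 : Int) ∈ adj.map pvSum ∧
      (((adj.map pvSum).filter (fun x => decide (x = 2))).length : Int) = (adj.length : Int) - 2
  · have hcondA : ¬(1 ∉ adj.map pvSum ∨ 3 ∉ adj.map pvSum ∨
        (((adj.map pvSum).filter (fun x => decide (x = 2))).length : Int) ≠ (adj.length : Int) - 2) := by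
      tauto
    have hcondB : ¬(1 ∉ adj.map pvSum ∨ 3 ∉ adj.map pvSum ∨
        ((((adj.map pvSum).count 2 : Nat)) : Int) ≠ (adj.length : Int) - 2) := by
      rw [pv_count_eq]; tauto
    rw [if_neg hcondA, if_neg hcondB]
    have hsq : ∀ row ∈ adj, row.length = adj.length := by
      rcases hpre with h | h
      · exact h
      · exact absurd hC h
    have h0 : 0 < adj.length := by
      have hne : adj.map pvSum ≠ [] := List.ne_nil_of_mem hC.1
      have hadj : adj ≠ [] := by intro hh; rw [hh] at hne; exact hne rfl
      exact List.length_pos_of_ne_nil hadj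
    obtain ⟨vis, heq, hlv, hch⟩ := pv_dfs_correct adj hsq (List.replicate adj.length false) [0]
      (by simp)
      (by intro e he
          have he0 : e = 0 := by simpa using he
          exact ⟨0, by simp [he0], h0, Relation.ReflTransGen.refl⟩)
      (by intro u hu hv; rw [pv_getD_replicate] at hv; cases hv)
      (by intro u v hedge hv; rw [pv_getD_replicate] at hv; cases hv)
      (Or.inl (by simp))
    rw [heq]
    rw [pv_foldl_const (pvSweep adj) adj.length (PySem.Set.ofList [(0 : Int)])]
    have hneEC : decide (adj.map pvSum ≠ []) = true := by
      simp [List.ne_nil_of_mem hC.1]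
    rw [Bool.eq_iff_iff]
    simp only [Bool.and_eq_true, hneEC, true_and, decide_eq_true_eq]
    rw [pv_all_iff, hlv, Nat.cast_inj, pv_F_len_iff adj hsq h0]
    exact forall_congr' (fun u => imp_congr_right (fun hu => hch u hu))
  · have hcondA : (1 ∉ adj.map pvSum ∨ 3 ∉ adj.map pvSum ∨
        (((adj.map pvSum).filter (fun x => decide (x = 2))).length : Int) ≠ (adj.length : Int) - 2) := by
      tauto
    have hcondB : (1 ∉ adj.map pvSum ∨ 3 ∉ adj.map pvSum ∨
        ((((adj.map pvSum).count 2 : Nat)) : Int) ≠ (adj.length : Int) - 2) := by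
      rw [pv_count_eq]; tauto
    rw [if_pos hcondA, if_pos hcondB]
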